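-- pv_equiv track=rewrite | github.com/TheRealNoa/Group4 | patient_creation.py | matches_trial
-- ===== SOURCE A (Python) =====
-- def matches_trial(patient, trial):
--     for inc in trial['inclusion']:
--         if not patient.get(inc, False):
--             return False
--     for exc in trial['exclusion']:
--         if patient.get(exc, False):  # exclusion violated
--             return False
--     return True
-- ===== SOURCE B (Python) =====
-- def matches_trial(patient, trial):
--     # Traverse the patient instead of the criteria: tick off required criteria
--     # from a shrinking 'need' set, then rescan for an exclusion hit.
--     need = set(trial['inclusion'])
--     for key, value in patient.items():
--         if value:
--             need.discard(key)
--     if need: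
--         return False
--     avoid = set(trial['exclusion'])
--     for key, value in patient.items():
--         if value and key in avoid:
--             return False
--     return True
-- ===== Notes on version B (the rewrite author's own statement) =====
-- stated objective: alternative
-- what changed: B reverses the traversal: instead of A's two loops over the criteria probing the patient dict per criterion, B iterates over the patient's items, ticking satisfied criteria off a shrinking 'need' set, and then rescans the patient for a truthy key in the exclusion set.
import Mathlib
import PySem

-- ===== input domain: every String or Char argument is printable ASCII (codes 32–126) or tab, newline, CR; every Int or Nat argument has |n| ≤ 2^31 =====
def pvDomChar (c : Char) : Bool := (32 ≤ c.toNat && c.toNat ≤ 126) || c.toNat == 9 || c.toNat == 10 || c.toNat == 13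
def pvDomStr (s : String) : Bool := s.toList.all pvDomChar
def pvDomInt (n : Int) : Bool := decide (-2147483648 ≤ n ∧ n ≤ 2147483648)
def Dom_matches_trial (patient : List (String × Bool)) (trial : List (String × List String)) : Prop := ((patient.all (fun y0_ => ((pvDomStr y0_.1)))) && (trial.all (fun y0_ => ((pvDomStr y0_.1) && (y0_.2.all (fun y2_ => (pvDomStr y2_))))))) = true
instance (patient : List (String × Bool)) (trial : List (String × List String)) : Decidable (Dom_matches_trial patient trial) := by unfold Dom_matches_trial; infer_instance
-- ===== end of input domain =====

-- B reverses the traversal: it iterates over the patient's items, ticking satisfied criteria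
-- off a shrinking 'need' set, then rescans the patient for an exclusion hit (alternative, not faster).

-- ===== PORT A =====
-- second loop of A: 'for exc in trial["exclusion"]: if patient.get(exc, False): return False' then 'return True'
def mtExcLoop (patient : List (String × Bool)) : List String → Bool
  | [] => true
  | exc :: rest =>
    if (PySem.Dict.mk patient).getD exc false then false else mtExcLoop patient rest

-- first loop of A; on normal completion it falls through to reading trial['exclusion'] and the second loop
def mtIncLoop (patient : List (String × Bool)) (trial : List (String × List String)) : List String → Bool
  | [] =>
    match (PySem.Dict.mk trial).get? "exclusion" with
    | none => false   -- KeyError in Python; excluded by Pre_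
    | some excs => mtExcLoop patient excs
  | inc :: rest =>
    if !((PySem.Dict.mk patient).getD inc false) then false else mtIncLoop patient trial rest

def matches_trial (patient : List (String × Bool)) (trial : List (String × List String)) : Bool :=
  match (PySem.Dict.mk trial).get? "inclusion" with
  | none => false     -- KeyError in Python; excluded by Pre_
  | some incs => mtIncLoop patient trial incs

-- ===== PORT B =====
-- 'for key, value in patient.items(): if value: need.discard(key)'
def mtAltNeedLoop (patient : List (String × Bool)) (need : PySem.Set String) : PySem.Set String :=
  patient.foldl (fun need kv => if kv.2 then PySem.Set.discard need kv.1 else need) need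

-- 'for key, value in patient.items(): if value and key in avoid: return False' then 'return True'
def mtAltExcScan (avoid : PySem.Set String) : List (String × Bool) → Bool
  | [] => true
  | kv :: rest =>
    if kv.2 && PySem.Set.contains avoid kv.1 then false else mtAltExcScan avoid rest

def matches_trial_alt (patient : List (String × Bool)) (trial : List (String × List String)) : Bool :=
  match (PySem.Dict.mk trial).get? "inclusion" with
  | none => false     -- KeyError in Python; excluded by Pre_
  | some incs =>
    let need := mtAltNeedLoop patient (PySem.Set.ofList incs)
    if !need.isEmpty then false
    else
      match (PySem.Dict.mk trial).get? "exclusion" with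
      | none => false -- KeyError in Python; excluded by Pre_
      | some excs => mtAltExcScan (PySem.Set.ofList excs) patient

-- ===== PRECONDITION & SPEC =====
-- Pre_ excludes (a) association lists with duplicate patient keys, which cannot arise from a Python
-- dict and whose first-match lookup order is accidental, and (b) trials on which A raises KeyError:
-- 'inclusion' missing, or 'exclusion' missing while every inclusion criterion is truthy.
def pvPreAux (patient : List (String × Bool)) (trial : List (String × List String)) : Bool :=
  match (PySem.Dict.mk trial).get? "inclusion" with
  | none => false
  | some incs =>
    !(incs.all (fun i => (PySem.Dict.mk patient).getD i false)) ||
      ((PySem.Dict.mk trial).get? "exclusion").isSome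

def Pre_matches_trial (patient : List (String × Bool)) (trial : List (String × List String)) : Prop :=
  (patient.map Prod.fst).Nodup ∧ pvPreAux patient trial = true
instance (patient : List (String × Bool)) (trial : List (String × List String)) : Decidable (Pre_matches_trial patient trial) := by unfold Pre_matches_trial; infer_instance

def pvWitness_matches_trial : (List (String × Bool)) × (List (String × List String)) :=
  ([("a", true), ("b", false)], [("inclusion", ["a"]), ("exclusion", ["b"])])

def Spec_matches_trial (patient : List (String × Bool)) (trial : List (String × List String)) (out : Bool) : Prop := out = matches_trial_alt patient trial
instance (patient : List (String × Bool)) (trial : List (String × List String)) (out : Bool) : Decidable (Spec_matches_trial patient trial out) := by unfold Spec_matches_trial; infer_instance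

-- ===== CLAIM (what is proved, stated in full; the proofs are below) =====
def Claim_equal_matches_trial : Prop := ∀ (patient : List (String × Bool)) (trial : List (String × List String)), Dom_matches_trial patient trial → Pre_matches_trial patient trial → Spec_matches_trial patient trial (matches_trial patient trial)

-- ===== LEMMAS AND PROOFS =====

-- with distinct patient keys, patient.get(i, False) is true iff some patient item (i, true) exists
theorem getD_eq_truthy (patient : List (String × Bool))
    (hnd : (patient.map Prod.fst).Nodup) (i : String) :
    (PySem.Dict.mk patient).getD i false = true ↔
      ∃ kv ∈ patient, kv.2 = true ∧ kv.1 = i := by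
  induction patient with
  | nil => simp [PySem.Dict.getD_eq_get?_getD, PySem.Dict.get?]
  | cons kv rest ih =>
    obtain ⟨k, v⟩ := kv
    simp only [List.map_cons, List.nodup_cons] at hnd
    rw [PySem.Dict.getD_eq_get?_getD, PySem.Dict.get?_mk_cons]
    by_cases hk : k = i
    · subst hk
      cases hv : v with
      | true => simp
      | false =>
        simp only [beq_self_eq_true, if_true, Option.getD_some]
        constructor
        · intro h; exact absurd h (by simp)
        · rintro ⟨⟨k', v'⟩, hmem, hv', hk'⟩
          exfalso
          rcases List.mem_cons.mp hmem with heq | hrest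
          · cases heq; exact Bool.false_ne_true hv'
          · exact hnd.1 (hk' ▸ List.mem_map_of_mem hrest)
    · have hbeq : (k == i) = false := by simp [hk]
      rw [hbeq]
      simp only [Bool.false_eq_true, if_false]
      rw [← PySem.Dict.getD_eq_get?_getD, ih hnd.2]
      constructor
      · rintro ⟨p, hp, h2, h1⟩; exact ⟨p, List.mem_cons_of_mem _ hp, h2, h1⟩
      · rintro ⟨p, hp, h2, h1⟩
        rcases List.mem_cons.mp hp with heq | hrest
        · subst heq; exact absurd h1 hk
        · exact ⟨p, hrest, h2, h1⟩

theorem mtExcLoop_eq_all (patient : List (String × Bool)) (excs : List String) :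
    mtExcLoop patient excs = excs.all (fun e => !((PySem.Dict.mk patient).getD e false)) := by
  induction excs with
  | nil => rfl
  | cons e rest ih =>
    simp only [mtExcLoop, List.all_cons]
    cases h : (PySem.Dict.mk patient).getD e false <;> simp [ih]

theorem mtIncLoop_eq_all (patient : List (String × Bool)) (trial : List (String × List String))
    (incs : List String) :
    mtIncLoop patient trial incs =
      if incs.all (fun i => (PySem.Dict.mk patient).getD i false) then
        (match (PySem.Dict.mk trial).get? "exclusion" with
         | none => false
         | some excs => mtExcLoop patient excs)
      else false := by
  induction incs with
  | nil => rfl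
  | cons i rest ih =>
    rcases Bool.eq_false_or_eq_true ((PySem.Dict.mk patient).getD i false) with h | h <;>
      simp [mtIncLoop, List.all_cons, h, ih]

-- membership after the discard loop: survivors are need-elements no truthy patient item names
theorem mem_mtAltNeedLoop (patient : List (String × Bool)) (need : PySem.Set String)
    (hnd : need.Nodup) (y : String) :
    y ∈ mtAltNeedLoop patient need ↔
      y ∈ need ∧ ¬ ∃ kv ∈ patient, kv.2 = true ∧ kv.1 = y := by
  induction patient generalizing need with
  | nil => simp [mtAltNeedLoop]
  | cons kv rest ih =>
    obtain ⟨k, v⟩ := kv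
    simp only [mtAltNeedLoop, List.foldl_cons] at *
    cases hv : v with
    | false =>
      simp only [Bool.false_eq_true, if_false]
      rw [ih need hnd]
      constructor
      · rintro ⟨hy, hno⟩
        exact ⟨hy, fun ⟨p, hp, h2, h1⟩ => by
          rcases List.mem_cons.mp hp with heq | hrest
          · subst heq; exact absurd h2 (by simp only [hv]; simp)
          · exact hno ⟨p, hrest, h2, h1⟩⟩
      · rintro ⟨hy, hno⟩
        exact ⟨hy, fun ⟨p, hp, h2, h1⟩ => hno ⟨p, List.mem_cons_of_mem _ hp, h2, h1⟩⟩
    | true =>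
      simp only [if_true]
      rw [ih _ (PySem.Set.nodup_discard _ _ hnd), PySem.Set.mem_discard]
      constructor
      · rintro ⟨⟨hy, hyk⟩, hno⟩
        refine ⟨hy, ?_⟩
        rintro ⟨p, hp, h2, h1⟩
        rcases List.mem_cons.mp hp with heq | hrest
        · cases heq; exact hyk h1.symm
        · exact hno ⟨p, hrest, h2, h1⟩
      · rintro ⟨hy, hno⟩
        refine ⟨⟨hy, ?_⟩, ?_⟩
        · intro hyk; exact hno ⟨(k, v), (by simp [hv]), hv, hyk.symm⟩
        · rintro ⟨p, hp, h2, h1⟩; exact hno ⟨p, List.mem_cons_of_mem _ hp, h2, h1⟩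

theorem mtAltExcScan_eq_true (avoid : PySem.Set String) (patient : List (String × Bool)) :
    mtAltExcScan avoid patient = true ↔
      ∀ kv ∈ patient, kv.2 = true → kv.1 ∉ avoid := by
  induction patient with
  | nil => simp [mtAltExcScan]
  | cons kv rest ih =>
    simp only [mtAltExcScan]
    by_cases h : kv.2 = true ∧ kv.1 ∈ avoid
    · have : (kv.2 && PySem.Set.contains avoid kv.1) = true := by
        rw [h.1, Bool.true_and, PySem.Set.contains_iff]; exact h.2
      rw [this]
      simp only [if_true]
      constructor
      · intro hx; exact absurd hx (by simp)
      · intro hall; exact absurd (hall kv (by simp) h.1) (by simpa using h.2)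
    · have : (kv.2 && PySem.Set.contains avoid kv.1) = false := by
        rcases Decidable.not_and_iff_not_or_not.mp h with h1 | h2
        · simp [Bool.eq_false_iff.mpr h1]
        · cases hc : PySem.Set.contains avoid kv.1
          · simp
          · exact absurd ((PySem.Set.contains_iff _ _).mp hc) h2
      rw [this]
      simp only [Bool.false_eq_true, if_false]
      rw [ih]
      constructor
      · intro hall p hp h2
        rcases List.mem_cons.mp hp with heq | hrest
        · subst heq
          rcases Decidable.not_and_iff_not_or_not.mp h with h1 | h2'
          · exact absurd h2 h1
          · exact h2'
        · exact hall p hrest h2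
      · intro hall p hp h2; exact hall p (List.mem_cons_of_mem _ hp) h2

-- ===== VERDICT (by name: the statement is the Claim_ definition above) =====
theorem matches_trial_spec : Claim_equal_matches_trial := by
  intro patient trial _ hpre
  obtain ⟨hnd, haux⟩ := hpre
  unfold Spec_matches_trial
  unfold pvPreAux at haux
  cases hinc : (PySem.Dict.mk trial).get? "inclusion" with
  | none => simp [hinc] at haux
  | some incs =>
    simp only [hinc] at haux
    simp only [matches_trial, matches_trial_alt, hinc]
    rw [mtIncLoop_eq_all]
    -- the inclusion test and B's need-set emptiness coincide
    have hneed : (mtAltNeedLoop patient (PySem.Set.ofList incs)).isEmpty =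
        incs.all (fun i => (PySem.Dict.mk patient).getD i false) := by
      by_cases h : ∀ i ∈ incs, (PySem.Dict.mk patient).getD i false = true
      · have h1 : incs.all (fun i => (PySem.Dict.mk patient).getD i false) = true := by
          simpa [List.all_eq_true] using h
        have h2 : (mtAltNeedLoop patient (PySem.Set.ofList incs)).isEmpty = true := by
          rw [List.isEmpty_iff, List.eq_nil_iff_forall_not_mem]
          intro y hy
          rw [mem_mtAltNeedLoop patient _ (PySem.Set.nodup_ofList _)] at hy
          exact hy.2 ((getD_eq_truthy patient hnd y).mp
            (h y ((PySem.Set.mem_ofList _ _).mp hy.1)))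
        rw [h1, h2]
      · push Not at h
        obtain ⟨i, hi, hgd⟩ := h
        have h1 : incs.all (fun i => (PySem.Dict.mk patient).getD i false) = false := by
          simp only [List.all_eq_false]
          exact ⟨i, hi, by simpa using hgd⟩
        have h2 : (mtAltNeedLoop patient (PySem.Set.ofList incs)).isEmpty = false := by
          have hmem : i ∈ mtAltNeedLoop patient (PySem.Set.ofList incs) := by
            rw [mem_mtAltNeedLoop patient _ (PySem.Set.nodup_ofList _)]
            exact ⟨(PySem.Set.mem_ofList _ _).mpr hi,
              fun hex => hgd ((getD_eq_truthy patient hnd i).mpr hex)⟩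
          cases hI : (mtAltNeedLoop patient (PySem.Set.ofList incs)).isEmpty with
          | false => rfl
          | true => exact absurd (List.isEmpty_iff.mp hI ▸ hmem) (List.not_mem_nil)
        rw [h1, h2]
    rw [hneed]
    cases hall : incs.all (fun i => (PySem.Dict.mk patient).getD i false) with
    | false => simp
    | true =>
      simp only [Bool.not_true, if_true, Bool.false_eq_true, if_false]
      rw [hall] at haux
      simp only [Bool.not_true, Bool.false_or] at haux
      cases hexc : (PySem.Dict.mk trial).get? "exclusion" with
      | none => simp [hexc] at haux
      | some excs =>
        simp only
        rw [mtExcLoop_eq_all]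
        by_cases h : ∀ e ∈ excs, (PySem.Dict.mk patient).getD e false = false
        · have h1 : excs.all (fun e => !((PySem.Dict.mk patient).getD e false)) = true := by
            simp only [List.all_eq_true]
            intro e he; rw [h e he]; rfl
          have h2 : mtAltExcScan (PySem.Set.ofList excs) patient = true := by
            rw [mtAltExcScan_eq_true]
            intro kv hkv h2c hmem
            have : (PySem.Dict.mk patient).getD kv.1 false = true :=
              (getD_eq_truthy patient hnd kv.1).mpr ⟨kv, hkv, h2c, rfl⟩
            rw [h kv.1 ((PySem.Set.mem_ofList _ _).mp hmem)] at this
            exact Bool.false_ne_true this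
          rw [h1, h2]
        · push Not at h
          obtain ⟨e, he, hgd⟩ := h
          have hgd' : (PySem.Dict.mk patient).getD e false = true := by
            cases hh : (PySem.Dict.mk patient).getD e false
            · exact absurd hh hgd
            · rfl
          have h1 : excs.all (fun e => !((PySem.Dict.mk patient).getD e false)) = false := by
            simp only [List.all_eq_false]
            exact ⟨e, he, by simp [hgd']⟩
          have h2 : mtAltExcScan (PySem.Set.ofList excs) patient = false := by
            obtain ⟨kv, hkv, hv, hk⟩ := (getD_eq_truthy patient hnd e).mp hgd'
            cases hs : mtAltExcScan (PySem.Set.ofList excs) patient with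
            | false => rfl
            | true =>
              exact absurd ((mtAltExcScan_eq_true _ _).mp hs kv hkv hv)
                (by rw [hk]; simpa using (PySem.Set.mem_ofList _ _).mpr he)
          rw [h1, h2]
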